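-- pv_equiv track=rewrite | github.com/tuanaidiel/coding | HiredlyTest/PART_A/Q6.py | calculate_shipping_cartons
-- ===== SOURCE A (Python) =====
-- def calculate_shipping_cartons(total_boxes=96):
--
--     for huge_cartons in range(1, total_boxes // 8 + 1):
--         huge_boxes = huge_cartons * 8
--         remaining_boxes = total_boxes - huge_boxes
--
--         for small_cartons in range(1, remaining_boxes // 10 + 1):
--             small_boxes = small_cartons * 10
--
--             if (huge_boxes + small_boxes == total_boxes and
--                 huge_boxes > small_boxes):
--                 return {
--                     'total_cartons': huge_cartons + small_cartons,
--                     'huge_cartons': huge_cartons,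
--                     'small_cartons': small_cartons,
--                     'huge_boxes': huge_boxes,
--                     'small_boxes': small_boxes
--                 }
--     return None
-- ===== SOURCE B (Python) =====
-- def calculate_shipping_cartons(total_boxes=96):
--     # For each huge-carton count, the small-carton count is forced by the
--     # remainder: check divisibility by 10 directly instead of scanning.
--     for huge_cartons in range(1, total_boxes // 8 + 1):
--         huge_boxes = huge_cartons * 8
--         remaining_boxes = total_boxes - huge_boxes
--         if remaining_boxes >= 10 and remaining_boxes % 10 == 0 and huge_boxes > remaining_boxes:
--             small_cartons = remaining_boxes // 10
--             return {
--                 'total_cartons': huge_cartons + small_cartons,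
--                 'huge_cartons': huge_cartons,
--                 'small_cartons': small_cartons,
--                 'huge_boxes': huge_boxes,
--                 'small_boxes': remaining_boxes
--             }
--     return None
-- ===== Notes on version B (the rewrite author's own statement) =====
-- stated objective: faster
-- what changed: B removes A's inner loop over small-carton counts: the remainder after the huge cartons forces the small count, so a single divisibility-by-10 check (and remaining//10) replaces the inner scan.
import Mathlib
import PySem

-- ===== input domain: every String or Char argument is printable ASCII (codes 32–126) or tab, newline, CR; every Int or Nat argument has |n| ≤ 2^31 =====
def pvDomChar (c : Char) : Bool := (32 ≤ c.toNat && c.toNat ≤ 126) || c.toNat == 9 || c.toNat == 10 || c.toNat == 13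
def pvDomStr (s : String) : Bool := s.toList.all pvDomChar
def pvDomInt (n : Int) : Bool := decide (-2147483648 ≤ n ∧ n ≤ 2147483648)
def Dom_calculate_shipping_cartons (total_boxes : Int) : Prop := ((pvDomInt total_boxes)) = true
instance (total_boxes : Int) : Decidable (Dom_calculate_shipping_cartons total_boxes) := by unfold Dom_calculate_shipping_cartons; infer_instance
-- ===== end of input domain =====

-- B drops A's inner scan over small-carton counts: the small count is forced by the
-- remainder, so one divisibility check replaces the loop (objective: faster, O(n) vs O(n^2)).

-- ===== PORT A =====
-- the returned dict literal (same for both ports; keys in Python insertion order)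
def pvCartonDict (huge_cartons small_cartons huge_boxes small_boxes : Int) :
    List (String × Int) :=
  [("total_cartons", huge_cartons + small_cartons),
   ("huge_cartons", huge_cartons),
   ("small_cartons", small_cartons),
   ("huge_boxes", huge_boxes),
   ("small_boxes", small_boxes)]

-- inner 'for small_cartons in …: if …: return …' as recursion over the range list
def pvInnerA (total_boxes huge_cartons huge_boxes : Int) :
    List Int → Option (List (String × Int))
  | [] => none
  | small_cartons :: rest =>
    let small_boxes := small_cartons * 10
    if huge_boxes + small_boxes = total_boxes ∧ huge_boxes > small_boxes then
      some (pvCartonDict huge_cartons small_cartons huge_boxes small_boxes)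
    else pvInnerA total_boxes huge_cartons huge_boxes rest

-- outer 'for huge_cartons in …' as recursion over the range list
def pvOuterA (total_boxes : Int) : List Int → Option (List (String × Int))
  | [] => none
  | huge_cartons :: rest =>
    let huge_boxes := huge_cartons * 8
    let remaining_boxes := total_boxes - huge_boxes
    match pvInnerA total_boxes huge_cartons huge_boxes
        (PySem.List.pyRange 1 (PySem.Int.floordiv remaining_boxes 10 + 1) 1) with
    | some d => some d
    | none => pvOuterA total_boxes rest

def calculate_shipping_cartons (total_boxes : Int) : Option (List (String × Int)) :=
  pvOuterA total_boxes
    (PySem.List.pyRange 1 (PySem.Int.floordiv total_boxes 8 + 1) 1)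

-- ===== PORT B =====
def pvOuterB (total_boxes : Int) : List Int → Option (List (String × Int))
  | [] => none
  | huge_cartons :: rest =>
    let huge_boxes := huge_cartons * 8
    let remaining_boxes := total_boxes - huge_boxes
    if remaining_boxes ≥ 10 ∧ PySem.Int.mod remaining_boxes 10 = 0 ∧
        huge_boxes > remaining_boxes then
      let small_cartons := PySem.Int.floordiv remaining_boxes 10
      some (pvCartonDict huge_cartons small_cartons huge_boxes remaining_boxes)
    else pvOuterB total_boxes rest

def calculate_shipping_cartons_alt (total_boxes : Int) : Option (List (String × Int)) :=
  pvOuterB total_boxes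
    (PySem.List.pyRange 1 (PySem.Int.floordiv total_boxes 8 + 1) 1)

-- ===== PRECONDITION & SPEC =====
def Spec_calculate_shipping_cartons (total_boxes : Int) (out : Option (List (String × Int))) : Prop := out = calculate_shipping_cartons_alt total_boxes
instance (total_boxes : Int) (out : Option (List (String × Int))) : Decidable (Spec_calculate_shipping_cartons total_boxes out) := by unfold Spec_calculate_shipping_cartons; infer_instance

-- ===== CLAIM (what is proved, stated in full; the proofs are below) =====
def Claim_equal_calculate_shipping_cartons : Prop := ∀ (total_boxes : Int), Dom_calculate_shipping_cartons total_boxes → Spec_calculate_shipping_cartons total_boxes (calculate_shipping_cartons total_boxes)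

-- ===== LEMMAS AND PROOFS =====

-- If every element of a prefix fails A's inner condition, the scan skips the prefix.
theorem pvInnerA_append_none (tb h hb : Int) (l1 l2 : List Int)
    (hfail : ∀ s ∈ l1, ¬(hb + s * 10 = tb ∧ hb > s * 10)) :
    pvInnerA tb h hb (l1 ++ l2) = pvInnerA tb h hb l2 := by
  induction l1 with
  | nil => rfl
  | cons a rest ih =>
    show (if hb + a * 10 = tb ∧ hb > a * 10 then _ else pvInnerA tb h hb (rest ++ l2)) = _
    rw [if_neg (hfail a (by simp)), ih (fun s hs => hfail s (by simp [hs]))]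

-- The inner scan of A finds the unique small count s with 10*s = remaining, iff it exists.
theorem pvInnerA_spec (tb h : Int) :
    pvInnerA tb h (h * 8)
        (PySem.List.pyRange 1 (PySem.Int.floordiv (tb - h * 8) 10 + 1) 1) =
      (if tb - h * 8 ≥ 10 ∧ PySem.Int.mod (tb - h * 8) 10 = 0 ∧ h * 8 > tb - h * 8 then
        some (pvCartonDict h (PySem.Int.floordiv (tb - h * 8) 10) (h * 8) (tb - h * 8))
      else none) := by
  have hd : PySem.Int.floordiv (tb - h * 8) 10 = (tb - h * 8) / 10 :=
    PySem.Int.floordiv_eq_ediv_of_pos (by norm_num)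
  have hm : PySem.Int.mod (tb - h * 8) 10 = (tb - h * 8) % 10 :=
    PySem.Int.mod_eq_emod_of_pos (by norm_num)
  set rem := tb - h * 8 with hrem
  by_cases hc : rem ≥ 10 ∧ PySem.Int.mod rem 10 = 0 ∧ h * 8 > rem
  · rw [if_pos hc]
    obtain ⟨h10, hmod, hgt⟩ := hc
    set s0 := PySem.Int.floordiv rem 10 with hs0
    have hs0v : s0 * 10 = rem := by rw [hd]; omega
    have hs0pos : 1 ≤ s0 := by omega
    rw [PySem.List.pyRange_one_append 1 s0 (s0 + 1) hs0pos (by omega),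
      PySem.List.pyRange_one_singleton]
    rw [pvInnerA_append_none]
    · show (if h * 8 + s0 * 10 = tb ∧ h * 8 > s0 * 10 then
          some (pvCartonDict h s0 (h * 8) (s0 * 10)) else _) = _
      rw [if_pos ⟨by omega, by omega⟩, hs0v]
    · intro s hs
      rw [PySem.List.mem_pyRange_one] at hs
      rintro ⟨he, _⟩
      omega
  · rw [if_neg hc]
    have : pvInnerA tb h (h * 8) (PySem.List.pyRange 1 (PySem.Int.floordiv rem 10 + 1) 1 ++ []) = pvInnerA tb h (h * 8) [] := by
      apply pvInnerA_append_none
      intro s hs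
      rw [PySem.List.mem_pyRange_one] at hs
      rintro ⟨he, hg⟩
      have hsrem : s * 10 = rem := by omega
      exact hc ⟨by omega, by omega, by omega⟩
    simpa using this

theorem pvOuter_eq (tb : Int) (l : List Int) :
    pvOuterA tb l = pvOuterB tb l := by
  induction l with
  | nil => rfl
  | cons h rest ih =>
    show (match pvInnerA tb h (h * 8)
        (PySem.List.pyRange 1 (PySem.Int.floordiv (tb - h * 8) 10 + 1) 1) with
      | some d => some d
      | none => pvOuterA tb rest) = _
    rw [pvInnerA_spec, pvOuterB]
    split_ifs with hc
    · rfl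
    · simpa using ih

-- ===== VERDICT (by name: the statement is the Claim_ definition above) =====
theorem calculate_shipping_cartons_spec : Claim_equal_calculate_shipping_cartons := by
  intro tb _
  show calculate_shipping_cartons tb = calculate_shipping_cartons_alt tb
  unfold calculate_shipping_cartons calculate_shipping_cartons_alt
  exact pvOuter_eq tb _
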